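-- pv_equiv track=rewrite | github.com/Ocean326/Butler | butler_main/butler_bot_code/butler_bot/butler_bot.py | _increment_from_stream
-- ===== SOURCE A (Python) =====
-- def _increment_from_stream(emitted: str, incoming: str) -> str:
--     if not incoming:
--         return ""
--     if not emitted:
--         return incoming
--     if incoming.startswith(emitted):
--         return incoming[len(emitted):]
--     if emitted.startswith(incoming) or incoming in emitted or emitted.endswith(incoming):
--         return ""
--     max_overlap = min(len(emitted), len(incoming))
--     for k in range(max_overlap, 0, -1):
--         if emitted[-k:] == incoming[:k]:
--             return incoming[k:]
--     return incoming
-- ===== SOURCE B (Python) =====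
-- def _increment_from_stream(emitted: str, incoming: str) -> str:
--     if not incoming:
--         return ""
--     if incoming in emitted:
--         return ""
--     # KMP prefix function on incoming + sentinel + emitted: the final value is the
--     # longest suffix of emitted that is a prefix of incoming (O(len(emitted)+len(incoming))).
--     s = incoming + "\x00" + emitted
--     pi = [0] * len(s)
--     k = 0
--     for idx in range(1, len(s)):
--         while k > 0 and s[idx] != s[k]:
--             k = pi[k - 1]
--         if s[idx] == s[k]:
--             k += 1
--         pi[idx] = k
--     return incoming[k:]
-- ===== Notes on version B (the rewrite author's own statement) =====
-- stated objective: faster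
-- what changed: B replaces A's descending per-length slice-comparison scan by a single KMP prefix-function pass over incoming + '\x00' + emitted whose final value is the longest suffix-of-emitted/prefix-of-incoming overlap, and collapses A's startswith/in/endswith branches into one substring test.
import Mathlib
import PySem

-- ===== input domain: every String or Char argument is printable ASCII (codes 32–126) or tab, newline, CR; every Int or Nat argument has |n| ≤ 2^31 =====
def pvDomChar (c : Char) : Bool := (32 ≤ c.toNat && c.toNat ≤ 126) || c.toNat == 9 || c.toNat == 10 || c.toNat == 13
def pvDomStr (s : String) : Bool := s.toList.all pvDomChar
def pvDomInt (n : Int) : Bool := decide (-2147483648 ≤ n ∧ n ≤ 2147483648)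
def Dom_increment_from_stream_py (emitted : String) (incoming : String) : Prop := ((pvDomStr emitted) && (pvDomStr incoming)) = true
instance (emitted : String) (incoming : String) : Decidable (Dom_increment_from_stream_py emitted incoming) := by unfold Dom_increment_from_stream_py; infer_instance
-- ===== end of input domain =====

-- B replaces A's descending overlap scan (each step a fresh slice comparison) by one KMP
-- prefix-function pass over incoming + '\x00' + emitted: O(n+m) instead of O(min(n,m)^2).

-- ===== PORT A =====
-- 'for k in range(max_overlap, 0, -1): if emitted[-k:] == incoming[:k]: return incoming[k:]' then 'return incoming'
def pyA_loop (e i : List Char) (incoming : String) : Nat → String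
  | 0 => incoming
  | k + 1 =>
    if PySem.List.slice e (some (-((k + 1 : Nat) : Int))) none
        == PySem.List.slice i none (some ((k + 1 : Nat) : Int)) then
      String.ofList (PySem.List.slice i (some ((k + 1 : Nat) : Int)) none)
    else
      pyA_loop e i incoming k

def increment_from_stream_py (emitted : String) (incoming : String) : String :=
  let e := emitted.toList
  let i := incoming.toList
  if i.isEmpty then ""
  else if e.isEmpty then incoming
  else if PySem.Chars.startswith i e then
    String.ofList (PySem.List.slice i (some (e.length : Int)) none)
  else if PySem.Chars.startswith e i || PySem.Chars.isIn i e || PySem.Chars.endswith e i then ""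
  else pyA_loop e i incoming (min e.length i.length)

-- ===== PORT B =====
-- the sentinel '\x00' of Source B (never occurs in Dom strings)
def sepC : Char := Char.ofNat 0

-- 'while k > 0 and s[idx] != s[k]: k = pi[k - 1]'.  The extra fuel argument (started at k)
-- only makes the recursion structural: each Python iteration replaces k by pi[k-1] ≤ k-1,
-- so the guard is never hit.  s[idx]/s[k] are always in range; the getD default is arbitrary.
def kmpWhile (s : List Char) (pi : List Nat) (c : Char) : Nat → Nat → Nat
  | _, 0 => 0
  | 0, k + 1 => k + 1
  | fuel + 1, k + 1 =>
    if s.getD (k + 1) sepC == c then k + 1 else kmpWhile s pi c fuel (pi.getD k 0)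

-- one iteration of Source B's for-loop body: state = (pi so far, k).  Python pre-allocates
-- pi = [0]*len(s) and writes pi[idx] = k at index idx = current length; positions ≥ idx are
-- never read before being written, so pi is represented as the append-only list of set values.
def kmpStep (s : List Char) (st : List Nat × Nat) (idx : Nat) : List Nat × Nat :=
  let c := s.getD idx sepC
  let k1 := kmpWhile s st.1 c st.2 st.2
  let k2 := if s.getD k1 sepC == c then k1 + 1 else k1
  (st.1 ++ [k2], k2)

-- 'pi = [0]*len(s); k = 0; for idx in range(1, len(s)): …'
def kmpFold (s : List Char) : List Nat × Nat :=
  (List.range' 1 (s.length - 1)).foldl (kmpStep s) ([0], 0)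

def increment_from_stream_py_alt (emitted : String) (incoming : String) : String :=
  let e := emitted.toList
  let i := incoming.toList
  if i.isEmpty then ""
  else if PySem.Chars.isIn i e then ""
  else
    let s := i ++ sepC :: e
    let k := (kmpFold s).2
    String.ofList (PySem.List.slice i (some (k : Int)) none)

-- ===== PRECONDITION & SPEC =====
def Spec_increment_from_stream_py (emitted : String) (incoming : String) (out : String) : Prop := out = increment_from_stream_py_alt emitted incoming
instance (emitted : String) (incoming : String) (out : String) : Decidable (Spec_increment_from_stream_py emitted incoming out) := by unfold Spec_increment_from_stream_py; infer_instance

-- ===== CLAIM (what is proved, stated in full; the proofs are below) =====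
def Claim_equal_increment_from_stream_py : Prop := ∀ (emitted : String) (incoming : String), Dom_increment_from_stream_py emitted incoming → Spec_increment_from_stream_py emitted incoming (increment_from_stream_py emitted incoming)

-- ===== LEMMAS AND PROOFS =====

-- the largest j ≤ m with incoming[:j] a suffix of emitted (0 if none): value of A's loop
def bestK (e i : List Char) : Nat → Nat
  | 0 => 0
  | k + 1 => if i.take (k + 1) <:+ e then k + 1 else bestK e i k

-- the longest proper border of s.take n (longest j < n with s.take j a suffix of s.take n)
def maxB (s : List Char) (n : Nat) : Nat :=
  Nat.findGreatest (fun j => j < n ∧ s.take j <:+ s.take n) n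

-- state of Source B's loop after processing indices 1..n
def kmpIter (s : List Char) : Nat → List Nat × Nat
  | 0 => ([0], 0)
  | n + 1 => kmpStep s (kmpIter s n) (n + 1)

-- ---------- A-side: the loop computes bestK ----------

theorem slice_neg_eq_drop (e : List Char) (k : Nat) (h1 : 1 ≤ k) (h2 : k ≤ e.length) :
    PySem.List.slice e (some (-(k : Int))) none = e.drop (e.length - k) := by
  have hk : ((e.length : Int) + -(k : Int)).toNat = e.length - k := by omega
  simp only [PySem.List.slice, PySem.List.clampIdx]
  split_ifs <;> try omega
  · rw [hk]
    apply List.take_of_length_le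
    simp

theorem condA_iff (e i : List Char) (k : Nat) (h1 : 1 ≤ k) (h2 : k ≤ min e.length i.length) :
    (PySem.List.slice e (some (-(k : Int))) none == PySem.List.slice i none (some (k : Int))) = true
      ↔ i.take k <:+ e := by
  rw [beq_iff_eq, slice_neg_eq_drop e k h1 (by omega), PySem.List.slice_to_natCast]
  have hlen : (i.take k).length = k := List.length_take_of_le (by omega)
  rw [List.suffix_iff_eq_drop, hlen]
  exact eq_comm

theorem pyA_loop_eq (emitted incoming : String) (k : Nat)
    (hk : k ≤ min emitted.toList.length incoming.toList.length) :
    pyA_loop emitted.toList incoming.toList incoming k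
      = String.ofList (incoming.toList.drop (bestK emitted.toList incoming.toList k)) := by
  induction k with
  | zero => simp [pyA_loop, bestK, String.ofList_toList]
  | succ k ih =>
    rw [pyA_loop, bestK]
    by_cases h : incoming.toList.take (k + 1) <:+ emitted.toList
    · rw [if_pos ((condA_iff _ _ _ (by omega) hk).mpr h), if_pos h,
        PySem.List.slice_from_natCast]
    · rw [if_neg (by rw [condA_iff _ _ _ (by omega) hk]; exact h), if_neg h, ih (by omega)]

theorem bestK_top (e i : List Char) (m : Nat) (h1 : 1 ≤ m) (h : i.take m <:+ e) :
    bestK e i m = m := by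
  cases m with
  | zero => omega
  | succ m => rw [bestK, if_pos h]

theorem bestK_eq_findGreatest (e i : List Char) (m : Nat) :
    bestK e i m = Nat.findGreatest (fun j => i.take j <:+ e) m := by
  induction m with
  | zero => rfl
  | succ m ih => rw [bestK, Nat.findGreatest_succ, ih]

-- ---------- generic list lemmas ----------

theorem findGreatest_spec_pos {P : Nat → Prop} [DecidablePred P] {b : Nat}
    (h : 0 < Nat.findGreatest P b) : P (Nat.findGreatest P b) := by
  rw [Nat.findGreatest_pos] at h
  obtain ⟨n, _, h2, h3⟩ := h
  exact Nat.findGreatest_spec h2 h3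

theorem suffix_of_suffix_length_le {x y z : List Char} (hx : x <:+ z) (hy : y <:+ z)
    (h : x.length ≤ y.length) : x <:+ y := by
  have hx' := List.suffix_iff_eq_drop.mp hx
  have hy' := List.suffix_iff_eq_drop.mp hy
  have hyL : y.length ≤ z.length := hy.length_le
  have hxL : x.length ≤ z.length := hx.length_le
  have key : y.drop (y.length - x.length) = x := by
    have hcg := congrArg (List.drop (y.length - x.length)) hy'
    rw [List.drop_drop,
      show z.length - y.length + (y.length - x.length) = z.length - x.length by omega] at hcg
    exact hcg.trans hx'.symm
  rw [← key]
  exact List.drop_suffix _ _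

theorem take_succ_getD (s : List Char) (j : Nat) (h : j < s.length) :
    s.take (j + 1) = s.take j ++ [s.getD j sepC] := by
  rw [List.take_succ, List.getD_eq_getElem s sepC h]
  simp [List.getElem?_eq_getElem h]

theorem concat_suffix_concat (x y : List Char) (a b : Char) :
    x ++ [a] <:+ y ++ [b] ↔ a = b ∧ x <:+ y := by
  rw [← List.reverse_prefix]
  simp only [List.reverse_append, List.reverse_cons, List.reverse_nil, List.nil_append,
    List.singleton_append]
  rw [List.cons_prefix_cons, List.reverse_prefix]

theorem border_succ_iff (s : List Char) (n j : Nat) (hn : n < s.length) (hj : j < n) :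
    (s.take (j + 1) <:+ s.take (n + 1))
      ↔ (s.take j <:+ s.take n ∧ s.getD j sepC = s.getD n sepC) := by
  rw [take_succ_getD s j (by omega), take_succ_getD s n hn, concat_suffix_concat]
  tauto

-- ---------- properties of maxB ----------

theorem maxB_spec (s : List Char) (n : Nat) (h : 0 < maxB s n) :
    maxB s n < n ∧ s.take (maxB s n) <:+ s.take n := by
  unfold maxB at h ⊢
  exact findGreatest_spec_pos h

theorem maxB_lt (s : List Char) (n : Nat) (h : 1 ≤ n) : maxB s n < n := by
  rcases Nat.eq_zero_or_pos (maxB s n) with h0 | h0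
  · omega
  · exact (maxB_spec s n h0).1

theorem maxB_suffix (s : List Char) (n : Nat) : s.take (maxB s n) <:+ s.take n := by
  rcases Nat.eq_zero_or_pos (maxB s n) with h0 | h0
  · simp [h0]
  · exact (maxB_spec s n h0).2

theorem maxB_is_greatest (s : List Char) (n j : Nat) (hj : j < n) (hs : s.take j <:+ s.take n) :
    j ≤ maxB s n :=
  Nat.le_findGreatest (by omega) ⟨hj, hs⟩

theorem maxB_one (s : List Char) : maxB s 1 = 0 := by
  simp [maxB, Nat.findGreatest_succ]

-- ---------- the while loop follows the border chain ----------

theorem kmpWhile_spec (s : List Char) (pi : List Nat) (c : Char) (n : Nat)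
    (hpi : ∀ j, j < n → pi.getD j 0 = maxB s (j + 1)) :
    ∀ fuel k, k ≤ fuel → k < n → s.take k <:+ s.take n →
      (kmpWhile s pi c fuel k ≤ k ∧ kmpWhile s pi c fuel k < n ∧
       s.take (kmpWhile s pi c fuel k) <:+ s.take n ∧
       (kmpWhile s pi c fuel k = 0 ∨ s.getD (kmpWhile s pi c fuel k) sepC = c) ∧
       (∀ j, j ≤ k → s.take j <:+ s.take n → s.getD j sepC = c → j ≤ kmpWhile s pi c fuel k)) := by
  have hwz : ∀ fuel, kmpWhile s pi c fuel 0 = 0 := by intro fuel; cases fuel <;> rfl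
  intro fuel
  induction fuel with
  | zero =>
    intro k hk hkn hkb
    interval_cases k
    rw [hwz]
    refine ⟨le_rfl, by omega, by simp, Or.inl rfl, ?_⟩
    intro j hj _ _; omega
  | succ fuel ih =>
    intro k hk hkn hkb
    match k with
    | 0 =>
      rw [hwz]
      refine ⟨le_rfl, by omega, by simp, Or.inl rfl, ?_⟩
      intro j hj _ _; omega
    | k + 1 =>
      rw [kmpWhile]
      by_cases hc : s.getD (k + 1) sepC = c
      · rw [if_pos (by simpa using hc)]
        exact ⟨le_rfl, hkn, hkb, Or.inr hc, fun j hj _ _ => hj⟩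
      · rw [if_neg (by simpa using hc), hpi k (by omega)]
        have hlt : maxB s (k + 1) < k + 1 := maxB_lt s (k + 1) (by omega)
        have hsub : s.take (maxB s (k + 1)) <:+ s.take n :=
          (maxB_suffix s (k + 1)).trans hkb
        obtain ⟨r1, r2, r3, r4, r5⟩ :=
          ih (maxB s (k + 1)) (by omega) (by omega) hsub
        refine ⟨by omega, r2, r3, r4, ?_⟩
        intro j hj hjb hjc
        rcases Nat.lt_or_ge j (k + 1) with hjk | hjk
        · -- j < k+1: j is a border of s.take (k+1), hence j ≤ maxB s (k+1)
          have hjtk : s.take j <:+ s.take (k + 1) :=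
            suffix_of_suffix_length_le hjb hkb (by simp [List.length_take]; omega)
          exact r5 j (maxB_is_greatest s (k + 1) j hjk hjtk) hjb hjc
        · -- j = k+1: contradicts s[k+1] ≠ c
          have : j = k + 1 := by omega
          exact absurd (this ▸ hjc) hc

-- ---------- one loop iteration computes the next maxB ----------

theorem kmp_step_snd (s : List Char) (pi : List Nat) (n : Nat) (h1 : 1 ≤ n) (hn : n < s.length)
    (hpi : ∀ j, j < n → pi.getD j 0 = maxB s (j + 1)) :
    (kmpStep s (pi, maxB s n) n).2 = maxB s (n + 1) := by
  have hlt : maxB s n < n := maxB_lt s n h1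
  obtain ⟨r1, r2, r3, r4, r5⟩ :=
    kmpWhile_spec s pi (s.getD n sepC) n hpi (maxB s n) (maxB s n) le_rfl hlt (maxB_suffix s n)
  set c := s.getD n sepC with hc
  set r := kmpWhile s pi c (maxB s n) (maxB s n) with hr
  show (if s.getD r sepC == c then r + 1 else r) = maxB s (n + 1)
  by_cases hrc : s.getD r sepC = c
  · rw [if_pos (by simpa using hrc)]
    -- r+1 is a border of s.take (n+1), and it is the greatest
    apply le_antisymm
    · apply maxB_is_greatest s (n + 1) (r + 1) (by omega)
      exact (border_succ_iff s n r hn r2).mpr ⟨r3, hrc⟩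
    · rcases Nat.eq_zero_or_pos (maxB s (n + 1)) with h0 | h0
      · omega
      · obtain ⟨m, hm⟩ : ∃ m, maxB s (n + 1) = m + 1 := ⟨maxB s (n + 1) - 1, by omega⟩
        have hb : m + 1 < n + 1 ∧ s.take (m + 1) <:+ s.take (n + 1) := by
          have := maxB_spec s (n + 1) h0
          exact hm ▸ this
        obtain ⟨hb1, hb2⟩ := (border_succ_iff s n m hn (by omega)).mp hb.2
        have : m ≤ r := r5 m (maxB_is_greatest s n m (by omega) hb1) hb1 hb2
        omega
  · rw [if_neg (by simpa using hrc)]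
    -- no extension matches: maxB (n+1) = 0 = r
    have hr0 : r = 0 := by
      rcases r4 with h | h
      · exact h
      · exact absurd h hrc
    rw [hr0]
    rcases Nat.eq_zero_or_pos (maxB s (n + 1)) with h0 | h0
    · omega
    · exfalso
      obtain ⟨m, hm⟩ : ∃ m, maxB s (n + 1) = m + 1 := ⟨maxB s (n + 1) - 1, by omega⟩
      have hb : m + 1 < n + 1 ∧ s.take (m + 1) <:+ s.take (n + 1) := by
        have := maxB_spec s (n + 1) h0
        exact hm ▸ this
      obtain ⟨hb1, hb2⟩ := (border_succ_iff s n m hn (by omega)).mp hb.2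
      have : m ≤ r := r5 m (maxB_is_greatest s n m (by omega) hb1) hb1 hb2
      rw [hr0] at this
      have : m = 0 := by omega
      rw [this] at hb2
      exact hrc (hr0 ▸ hb2)

-- ---------- the fold invariant ----------

theorem kmpIter_inv (s : List Char) (n : Nat) (hn : n + 1 ≤ s.length) :
    kmpIter s n = ((List.range (n + 1)).map (fun j => maxB s (j + 1)), maxB s (n + 1)) := by
  induction n with
  | zero => simp [kmpIter, maxB_one]
  | succ n ih =>
    have ihn := ih (by omega)
    rw [kmpIter, ihn]
    have hpi : ∀ j, j < n + 1 →
        ((List.range (n + 1)).map (fun j => maxB s (j + 1))).getD j 0 = maxB s (j + 1) := by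
      intro j hj
      rw [List.getD_eq_getElem _ _ (by simpa using hj)]
      simp
    have hsnd := kmp_step_snd s ((List.range (n + 1)).map (fun j => maxB s (j + 1)))
      (n + 1) (by omega) (by omega) hpi
    unfold kmpStep at hsnd ⊢
    simp only at hsnd ⊢
    rw [hsnd]
    congr 1
    simp [List.range_succ]

theorem kmpFold_eq (s : List Char) (hs : 1 ≤ s.length) :
    kmpFold s = kmpIter s (s.length - 1) := by
  unfold kmpFold
  generalize s.length - 1 = n
  induction n with
  | zero => rfl
  | succ n ih =>
    rw [List.range'_1_concat, List.foldl_append, ih, List.foldl_cons, List.foldl_nil,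
      Nat.add_comm 1 n, kmpIter]

-- ---------- the sentinel splits the final border ----------

theorem sep_at (e i : List Char) (m : Nat) (hm : m < (i ++ sepC :: e).length)
    (hsi : sepC ∉ i) (hse : sepC ∉ e) :
    (i ++ sepC :: e).getD m sepC = sepC ↔ m = i.length := by
  constructor
  · intro h
    by_contra hne
    rcases Nat.lt_or_ge m i.length with hlt | hge
    · rw [List.getD_eq_getElem _ _ hm, List.getElem_append_left hlt] at h
      exact hsi (h ▸ List.getElem_mem _)
    · obtain ⟨t, rfl⟩ : ∃ t, m = i.length + 1 + t := ⟨m - i.length - 1, by omega⟩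
      rw [List.getD_eq_getElem _ _ hm, List.getElem_append_right (by omega)] at h
      simp only [show i.length + 1 + t - i.length = t + 1 by omega,
        List.getElem_cons_succ] at h
      exact hse (h ▸ List.getElem_mem _)
  · intro h
    subst h
    rw [List.getD_eq_getElem _ _ hm, List.getElem_append_right le_rfl]
    simp

theorem final_border_iff (e i : List Char) (hsi : sepC ∉ i) (hse : sepC ∉ e)
    (j : Nat) (hj1 : 1 ≤ j) :
    (j < (i ++ sepC :: e).length ∧ (i ++ sepC :: e).take j <:+ (i ++ sepC :: e))
      ↔ (j ≤ min e.length i.length ∧ i.take j <:+ e) := by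
  obtain ⟨s, hs⟩ : ∃ s', s' = i ++ sepC :: e := ⟨_, rfl⟩
  rw [← hs]
  have hL : s.length = i.length + 1 + e.length := by rw [hs]; simp; omega
  constructor
  · rintro ⟨hjL, hsuf⟩
    have hlen : (s.take j).length = j := by rw [List.length_take]; omega
    have hdrop : s.take j = s.drop (s.length - j) := by
      have := List.suffix_iff_eq_drop.mp hsuf
      rwa [hlen] at this
    have hdlen : (s.drop (s.length - j)).length = j := by rw [List.length_drop]; omega
    -- (a) j ≤ i.length
    have ha : j ≤ i.length := by
      by_contra hgt
      push_neg at hgt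
      have hg1 : i.length < (s.take j).length := by omega
      have hg2 : i.length < s.length := by omega
      have h1 : (s.take j).getD i.length sepC = s.getD i.length sepC := by
        rw [List.getD_eq_getElem _ _ hg1, List.getD_eq_getElem _ _ hg2]
        exact List.getElem_take
      have hg3 : i.length < (s.drop (s.length - j)).length := by omega
      have hg4 : s.length - j + i.length < s.length := by omega
      have h2 : (s.drop (s.length - j)).getD i.length sepC
          = s.getD (s.length - j + i.length) sepC := by
        rw [List.getD_eq_getElem _ _ hg3, List.getD_eq_getElem _ _ hg4]
        exact List.getElem_drop ..
      have hsep : s.getD i.length sepC = sepC := by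
        have hsa := sep_at e i i.length (by rw [← hs]; omega) hsi hse
        rw [← hs] at hsa
        exact hsa.mpr rfl
      have hend : s.getD (s.length - j + i.length) sepC = sepC := by
        rw [← h2, ← hdrop, h1, hsep]
      have hsa := sep_at e i (s.length - j + i.length) (by rw [← hs]; omega) hsi hse
      rw [← hs] at hsa
      have := hsa.mp hend
      omega
    -- (b) j ≤ e.length
    have hb : j ≤ e.length := by
      by_contra hgt
      push_neg at hgt
      have hg1 : j - e.length - 1 < (s.drop (s.length - j)).length := by omega
      have hg2 : s.length - j + (j - e.length - 1) < s.length := by omega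
      have h2 : (s.drop (s.length - j)).getD (j - e.length - 1) sepC
          = s.getD (s.length - j + (j - e.length - 1)) sepC := by
        rw [List.getD_eq_getElem _ _ hg1, List.getD_eq_getElem _ _ hg2]
        exact List.getElem_drop ..
      have hsm : s.length - j + (j - e.length - 1) = i.length := by omega
      have hsep : s.getD (s.length - j + (j - e.length - 1)) sepC = sepC := by
        have hsa := sep_at e i i.length (by rw [← hs]; omega) hsi hse
        rw [← hs] at hsa
        rw [hsm]
        exact hsa.mpr rfl
      have hg3 : j - e.length - 1 < (s.take j).length := by omega
      have hg4 : j - e.length - 1 < s.length := by omega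
      have h1 : (s.take j).getD (j - e.length - 1) sepC = s.getD (j - e.length - 1) sepC := by
        rw [List.getD_eq_getElem _ _ hg3, List.getD_eq_getElem _ _ hg4]
        exact List.getElem_take
      have hend : s.getD (j - e.length - 1) sepC = sepC := by
        rw [← h1, hdrop, h2, hsep]
      have hsa := sep_at e i (j - e.length - 1) (by rw [← hs]; omega) hsi hse
      rw [← hs] at hsa
      have := hsa.mp hend
      omega
    refine ⟨by omega, ?_⟩
    -- (c) i.take j is a suffix of e
    have htake : s.take j = i.take j := by
      rw [hs]; exact List.take_append_of_le_length ha
    have hdr : s.drop (s.length - j) = e.drop (e.length - j) := by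
      have h5 : s.length - j = i.length + (e.length - j + 1) := by omega
      rw [h5, hs, List.drop_append, List.drop_eq_nil_of_le (Nat.le_add_right _ _),
        Nat.add_sub_cancel_left, List.drop_succ_cons]
      simp
    rw [List.suffix_iff_eq_drop]
    have hjlen : (i.take j).length = j := by rw [List.length_take]; omega
    rw [hjlen, ← htake, hdrop, hdr]
  · rintro ⟨hjm, hsuf⟩
    refine ⟨by omega, ?_⟩
    have htake : s.take j = i.take j := by
      rw [hs]; exact List.take_append_of_le_length (by omega)
    rw [htake, hs]
    exact hsuf.trans ((List.suffix_cons sepC e).trans (List.suffix_append i (sepC :: e)))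

theorem maxB_concat (e i : List Char) (hi : i ≠ []) (hsi : sepC ∉ i) (hse : sepC ∉ e) :
    maxB (i ++ sepC :: e) (i ++ sepC :: e).length = bestK e i (min e.length i.length) := by
  obtain ⟨s, hs⟩ : ∃ s', s' = i ++ sepC :: e := ⟨_, rfl⟩
  rw [← hs, bestK_eq_findGreatest]
  have hfb : ∀ j, 1 ≤ j →
      ((j < s.length ∧ s.take j <:+ s) ↔ (j ≤ min e.length i.length ∧ i.take j <:+ e)) := by
    intro j hj
    rw [hs]
    exact final_border_iff e i hsi hse j hj
  apply le_antisymm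
  · rcases Nat.eq_zero_or_pos (maxB s s.length) with h0 | h0
    · omega
    · have hb := maxB_spec s s.length h0
      rw [List.take_length] at hb
      obtain ⟨h1, h2⟩ := (hfb _ h0).mp ⟨hb.1, hb.2⟩
      exact Nat.le_findGreatest h1 h2
  · rcases Nat.eq_zero_or_pos (Nat.findGreatest (fun j => i.take j <:+ e) (min e.length i.length))
      with h0 | h0
    · omega
    · have hb := findGreatest_spec_pos h0
      have hle := Nat.findGreatest_le (P := fun j => i.take j <:+ e) (min e.length i.length)
      obtain ⟨h1, h2⟩ := (hfb _ h0).mpr ⟨hle, hb⟩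
      refine maxB_is_greatest s s.length _ h1 ?_
      rw [List.take_length]
      exact h2

-- ---------- the whole B pipeline computes bestK ----------

theorem kmp_final (e i : List Char) (hi : i ≠ []) (hsi : sepC ∉ i) (hse : sepC ∉ e) :
    (kmpFold (i ++ sepC :: e)).2 = bestK e i (min e.length i.length) := by
  obtain ⟨s, hs⟩ : ∃ s', s' = i ++ sepC :: e := ⟨_, rfl⟩
  rw [← hs]
  have hL : 1 ≤ s.length := by rw [hs]; simp; omega
  rw [kmpFold_eq s hL, kmpIter_inv s (s.length - 1) (by omega)]
  simp only
  have h1 : s.length - 1 + 1 = s.length := by omega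
  rw [h1, hs, maxB_concat e i hi hsi hse]

theorem dom_no_sep (t : String) (h : pvDomStr t = true) : sepC ∉ t.toList := by
  intro hmem
  have := List.all_eq_true.mp h sepC hmem
  simp [pvDomChar, sepC] at this

-- ===== VERDICT (by name: the statement is the Claim_ definition above) =====
theorem increment_from_stream_py_spec : Claim_equal_increment_from_stream_py := by
  intro emitted incoming hdom
  have hde : pvDomStr emitted = true := by
    unfold Dom_increment_from_stream_py at hdom
    exact (Bool.and_eq_true_iff.mp hdom).1
  have hdi : pvDomStr incoming = true := by
    unfold Dom_increment_from_stream_py at hdom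
    exact (Bool.and_eq_true_iff.mp hdom).2
  have hse := dom_no_sep emitted hde
  have hsi := dom_no_sep incoming hdi
  unfold Spec_increment_from_stream_py increment_from_stream_py increment_from_stream_py_alt
  simp only []
  by_cases hi : incoming.toList.isEmpty
  · rw [if_pos hi, if_pos hi]
  rw [if_neg hi, if_neg hi]
  have hine : incoming.toList ≠ [] := by simpa [List.isEmpty_iff] using hi
  have hkmp := kmp_final emitted.toList incoming.toList hine hsi hse
  by_cases he : emitted.toList.isEmpty
  · -- emitted empty: A returns incoming; B's overlap is 0
    have he' : emitted.toList = [] := by simpa [List.isEmpty_iff] using he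
    rw [if_pos he]
    have hin : PySem.Chars.isIn incoming.toList emitted.toList = false := by
      rw [← Bool.not_eq_true, PySem.Chars.isIn_iff_infix, he']
      simp [hine]
    rw [if_neg (by simp [hin])]
    rw [hkmp, he']
    simp [bestK, PySem.List.slice_from_natCast, String.ofList_toList]
  · rw [if_neg he]
    have hee : emitted.toList ≠ [] := by simpa [List.isEmpty_iff] using he
    by_cases hsw : PySem.Chars.startswith incoming.toList emitted.toList
    · have hpre : emitted.toList <+: incoming.toList :=
        (PySem.Chars.startswith_iff _ _).mp hsw
      rw [if_pos hsw]
      by_cases hin : PySem.Chars.isIn incoming.toList emitted.toList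
      · -- incoming inside emitted and emitted prefix of incoming ⇒ equal lengths, both ""
        have hinf : incoming.toList <:+: emitted.toList :=
          (PySem.Chars.isIn_iff_infix _ _).mp hin
        have hlen : emitted.toList.length = incoming.toList.length :=
          le_antisymm hpre.length_le hinf.length_le
        rw [if_pos hin, PySem.List.slice_from_natCast,
          List.drop_of_length_le (le_of_eq hlen.symm)]
      · rw [if_neg hin, hkmp]
        have hmin : min emitted.toList.length incoming.toList.length
            = emitted.toList.length := by
          have := hpre.length_le; omega
        have htake : incoming.toList.take emitted.toList.length = emitted.toList :=
          (List.prefix_iff_eq_take.mp hpre).symm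
        have hlen1 : 1 ≤ emitted.toList.length := by
          cases h : emitted.toList with
          | nil => exact absurd h hee
          | cons a t => simp [h]
        rw [hmin, bestK_top _ _ _ hlen1 (by rw [htake]), PySem.List.slice_from_natCast]
    · rw [if_neg hsw]
      by_cases hin : PySem.Chars.isIn incoming.toList emitted.toList
      · rw [if_pos hin, if_pos (by simp [hin])]
      · have hd : (PySem.Chars.startswith emitted.toList incoming.toList
            || PySem.Chars.isIn incoming.toList emitted.toList
            || PySem.Chars.endswith emitted.toList incoming.toList) = false := by
          simp only [Bool.or_eq_false_iff]
          refine ⟨⟨?_, by simpa using hin⟩, ?_⟩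
          · by_contra h
            rw [Bool.not_eq_false, PySem.Chars.startswith_iff] at h
            exact hin ((PySem.Chars.isIn_iff_infix _ _).mpr h.isInfix)
          · by_contra h
            rw [Bool.not_eq_false, PySem.Chars.endswith_iff] at h
            exact hin ((PySem.Chars.isIn_iff_infix _ _).mpr h.isInfix)
        rw [if_neg hin, if_neg (by simp [hd]), pyA_loop_eq emitted incoming _ le_rfl,
          hkmp, PySem.List.slice_from_natCast]
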